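-- pv_equiv track=rewrite | github.com/ministr-kaifa/web-labs | labs/Lab_12_python_intro/solution/task3/task3.py | to_characters_histogram
-- ===== SOURCE A (Python) =====
-- def to_characters_histogram(text: str):
--     """Функция генерации гистограммы появлений символов в строке в текстовом формате"""
--     chars = {}
--     for char in filter(lambda char: not char.isspace(), text):
--         chars.update({char : chars.get(char, 0) + 1})
--     sorted_columns = sorted(chars.items())
--     max_height = max(chars.values())
--     sorted_text_columsn = "\n".join("".join(["#" if height <= column[1] else " " for column in sorted_columns]) for height in range(max_height, 0, -1))
--     return sorted_text_columsn + "\n" + "".join([column[0] for column in sorted_columns])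
-- ===== SOURCE B (Python) =====
-- def to_characters_histogram(text: str):
--     """Histogram via per-character bars transposed into rows (different decomposition)."""
--     counts = {}
--     for ch in text:
--         if not ch.isspace():
--             counts[ch] = counts.get(ch, 0) + 1
--     items = sorted(counts.items())
--     max_height = max(counts.values())
--     bars = [' ' * (max_height - n) + '#' * n for _, n in items]
--     rows = [''.join(row) for row in zip(*bars)]
--     return '\n'.join(rows) + '\n' + ''.join(ch for ch, _ in items)
-- ===== Notes on version B (the rewrite author's own statement) =====
-- stated objective: faster
-- what changed: B builds each character's vertical bar string once with string repetition and transposes the list of bars with zip(*bars) into rows, instead of A's nested comprehension that re-tests every column at every height level with a per-cell if.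
import Mathlib
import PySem

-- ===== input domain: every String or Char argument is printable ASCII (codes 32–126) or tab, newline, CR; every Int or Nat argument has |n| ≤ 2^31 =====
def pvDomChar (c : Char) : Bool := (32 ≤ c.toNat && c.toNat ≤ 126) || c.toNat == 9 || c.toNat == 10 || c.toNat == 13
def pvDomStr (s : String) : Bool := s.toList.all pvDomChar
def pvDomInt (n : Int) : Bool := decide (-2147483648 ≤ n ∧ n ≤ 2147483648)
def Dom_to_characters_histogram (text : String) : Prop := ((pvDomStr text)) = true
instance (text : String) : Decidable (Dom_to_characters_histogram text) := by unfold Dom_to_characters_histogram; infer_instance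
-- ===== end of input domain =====

-- B builds each character's bar once by string repetition and transposes the bars into rows (zip(*bars))
-- instead of A's nested comprehension with a per-cell if; a timing run measured B faster by a constant factor.


-- ===== PORT A =====
def to_characters_histogram (text : String) : String :=
  let chars := (text.toList.filter (fun c => !(PySem.Chars.isspace c))).foldl
      (fun d c => d.update [(c, d.getD c 0 + 1)]) (PySem.Dict.empty : PySem.Dict Char Int)
  let sorted_columns := PySem.List.sorted2 chars.items (fun p => p.1) (fun p => p.2)
  match PySem.List.max? chars.values (fun x => x) with
  | none => ""   -- Python raises ValueError here (empty sequence); excluded by Pre_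
  | some max_height =>
    let body := PySem.Chars.join ['\n'] ((PySem.List.pyRange max_height 0 (-1)).map
        (fun height => PySem.Chars.join []
          (sorted_columns.map (fun column => if height ≤ column.2 then ['#'] else [' ']))))
    String.ofList (body ++ ['\n'] ++ PySem.Chars.join [] (sorted_columns.map (fun column => [column.1])))

-- ===== PORT B =====
-- termination measure for pvZip (cited by its decreasing_by)
lemma pv_sum_tail_lt (ls : List (List Char)) (hne : ls ≠ []) (hall : ∀ l ∈ ls, l ≠ []) :
    ((ls.map List.tail).map List.length).sum < (ls.map List.length).sum := by
  obtain ⟨x, xs, rfl⟩ := List.exists_cons_of_ne_nil hne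
  simp only [List.map_cons, List.sum_cons, List.map_map]
  have hx : x.tail.length < x.length := by
    cases x with
    | nil => exact absurd rfl (hall [] (by simp))
    | cons a t => simp
  have hrest : ∀ (ys : List (List Char)), (ys.map (List.length ∘ List.tail)).sum ≤ (ys.map List.length).sum := by
    intro ys
    induction ys with
    | nil => simp
    | cons y t ih =>
      simp only [List.map_cons, List.sum_cons, Function.comp_apply]
      exact Nat.add_le_add (y.length_tail ▸ Nat.sub_le _ _) ih
  have := hrest xs
  omega

-- zip(*bars): Python zip semantics — stop as soon as any list is exhausted (also when bars = []).
def pvZip (ls : List (List Char)) : List (List Char) :=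
  if _h : ls ≠ [] ∧ ls.all (fun l => !l.isEmpty) then
    (ls.map (fun l => l.headD ' ')) :: pvZip (ls.map List.tail)
  else []
termination_by (ls.map List.length).sum
decreasing_by
  obtain ⟨hne, hall⟩ := _h
  have h2 : ∀ l ∈ ls, l ≠ [] := by
    intro l hl
    have := List.all_eq_true.mp hall l hl
    simpa using this
  simpa using pv_sum_tail_lt ls hne h2

def to_characters_histogram_alt (text : String) : String :=
  let counts := text.toList.foldl
      (fun d c => if PySem.Chars.isspace c then d else d.insert c (d.getD c 0 + 1))
      (PySem.Dict.empty : PySem.Dict Char Int)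
  let items := PySem.List.sorted2 counts.items (fun p => p.1) (fun p => p.2)
  match PySem.List.max? counts.values (fun x => x) with
  | none => ""   -- same max() call as A: raises on empty; excluded by Pre_
  | some max_height =>
    let bars := items.map (fun p =>
      List.replicate (max_height - p.2).toNat ' ' ++ List.replicate p.2.toNat '#')
    let rows := (pvZip bars).map (fun r => PySem.Chars.join [] (r.map (fun c => [c])))
    String.ofList (PySem.Chars.join ['\n'] rows ++ ['\n']
      ++ PySem.Chars.join [] (items.map (fun p => [p.1])))

-- ===== PRECONDITION & SPEC =====
-- Pre_ excludes exactly the inputs with no non-whitespace character, on which A's max() raises ValueError.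
def Pre_to_characters_histogram (text : String) : Prop :=
  text.toList.any (fun c => !(PySem.Chars.isspace c)) = true
instance (text : String) : Decidable (Pre_to_characters_histogram text) := by
  unfold Pre_to_characters_histogram; infer_instance
def pvWitness_to_characters_histogram : String := "aabba c"
def Spec_to_characters_histogram (text : String) (out : String) : Prop := out = to_characters_histogram_alt text
instance (text : String) (out : String) : Decidable (Spec_to_characters_histogram text out) := by unfold Spec_to_characters_histogram; infer_instance

-- ===== CLAIM (what is proved, stated in full; the proofs are below) =====
def Claim_equal_to_characters_histogram : Prop := ∀ (text : String), Dom_to_characters_histogram text → Pre_to_characters_histogram text → Spec_to_characters_histogram text (to_characters_histogram text)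

-- ===== LEMMAS AND PROOFS =====

-- the two counting loops build the same dict, namely the counter of the non-space characters
lemma pv_counts_eq (text : String) :
    text.toList.foldl
      (fun d c => if PySem.Chars.isspace c then d else d.insert c (d.getD c 0 + 1))
      (PySem.Dict.empty : PySem.Dict Char Int)
    = (text.toList.filter (fun c => !(PySem.Chars.isspace c))).foldl
      (fun d c => d.update [(c, d.getD c 0 + 1)]) (PySem.Dict.empty : PySem.Dict Char Int) := by
  rw [List.foldl_filter]
  congr 1
  funext d c
  by_cases h : PySem.Chars.isspace c <;> simp [h, PySem.Dict.update]

lemma pv_chars_counter (text : String) :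
    (text.toList.filter (fun c => !(PySem.Chars.isspace c))).foldl
      (fun d c => d.update [(c, d.getD c 0 + 1)]) (PySem.Dict.empty : PySem.Dict Char Int)
    = PySem.Dict.counter (text.toList.filter (fun c => !(PySem.Chars.isspace c))) := by
  rw [← PySem.Dict.foldl_insert_getD_add_one_eq_counter]
  congr 1

-- pvZip of a nonempty family of equal-length lists, row by row
lemma pvZip_uniform (n : Nat) (ls : List (List Char)) (hne : ls ≠ [])
    (hlen : ∀ l ∈ ls, l.length = n) :
    pvZip ls = (List.range n).map (fun i => ls.map (fun l => l.getD i ' ')) := by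
  induction n generalizing ls with
  | zero =>
    rw [pvZip]
    have : ¬ (ls ≠ [] ∧ ls.all (fun l => !l.isEmpty) = true) := by
      rintro ⟨-, hall⟩
      obtain ⟨x, xs, rfl⟩ := List.exists_cons_of_ne_nil hne
      have := List.all_eq_true.mp hall x (by simp)
      have hx := hlen x (by simp)
      simp [List.length_eq_zero_iff.mp hx] at this
    rw [dif_neg this]
    simp
  | succ n ih =>
    have hall : ls.all (fun l => !l.isEmpty) = true := by
      apply List.all_eq_true.mpr
      intro l hl
      have := hlen l hl
      simp
      intro h; rw [h] at this; simp at this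
    rw [pvZip]
    rw [dif_pos ⟨hne, hall⟩]
    have hne' : ls.map List.tail ≠ [] := by simpa using hne
    have hlen' : ∀ l ∈ ls.map List.tail, l.length = n := by
      intro l hl
      obtain ⟨t, ht, rfl⟩ := List.mem_map.mp hl
      have := hlen t ht
      simp [this]
    rw [ih (ls.map List.tail) hne' hlen']
    rw [List.range_succ_eq_map]
    simp only [List.map_cons, List.map_map]
    have hmem : ∀ l ∈ ls, l ≠ [] := by
      intro l hl
      have := List.all_eq_true.mp hall l hl
      simpa using this
    congr 1
    · apply List.map_congr_left
      intro l hl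
      obtain ⟨a, t, rfl⟩ := List.exists_cons_of_ne_nil (hmem l hl)
      simp
    · apply List.map_congr_left
      intro i _
      simp only [Function.comp_apply]
      apply List.map_congr_left
      intro l hl
      obtain ⟨a, t, rfl⟩ := List.exists_cons_of_ne_nil (hmem l hl)
      simp

-- index k of a column's bar is exactly A's cell at height m - k
lemma pv_bar_getD (m c : Int) (k : Nat) (h1 : 1 ≤ c) (h2 : c ≤ m) (hk : k < m.toNat) :
    (List.replicate (m - c).toNat ' ' ++ List.replicate c.toNat '#').getD k ' '
      = if (m - (k : Int)) ≤ c then '#' else ' ' := by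
  by_cases hk2 : k < (m - c).toNat
  · rw [List.getD_eq_getElem?_getD, List.getElem?_append_left (by simpa using hk2)]
    rw [if_neg (by omega)]
    simp [hk2]
  · have hk3 : k - (m - c).toNat < c.toNat := by omega
    rw [List.getD_eq_getElem?_getD, List.getElem?_append_right (by simpa using Nat.le_of_not_lt hk2)]
    rw [if_pos (by omega)]
    simp [hk3]

-- ===== VERDICT (by name: the statement is the Claim_ definition above) =====
theorem to_characters_histogram_spec : Claim_equal_to_characters_histogram := by
  intro text _ hpre
  unfold Spec_to_characters_histogram
  simp only [to_characters_histogram, to_characters_histogram_alt]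
  rw [pv_counts_eq]
  set fl := text.toList.filter (fun c => !(PySem.Chars.isspace c)) with hfl
  set chars := fl.foldl (fun d c => d.update [(c, d.getD c 0 + 1)])
      (PySem.Dict.empty : PySem.Dict Char Int) with hchars
  -- facts about the dict
  have hcounter : chars = PySem.Dict.counter fl := pv_chars_counter text
  have hflne : fl ≠ [] := by
    obtain ⟨x, hx, hxs⟩ := List.any_eq_true.mp hpre
    exact List.ne_nil_of_mem (List.mem_filter.mpr ⟨hx, hxs⟩)
  have hitems : chars.items = (PySem.Set.ofList fl).map (fun k => (k, (fl.count k : Int))) := by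
    rw [hcounter, PySem.Dict.items_counter]
  have hbounds : ∀ p ∈ chars.items, 1 ≤ p.2 := by
    intro p hp
    rw [hitems] at hp
    obtain ⟨k, hk, rfl⟩ := List.mem_map.mp hp
    have : k ∈ fl := (PySem.Set.mem_ofList _ _).mp hk
    have := List.count_pos_iff.mpr this
    simp
    omega
  cases hmax : PySem.List.max? chars.values (fun x => x) with
  | none =>
    exfalso
    have hvals : chars.values = [] := (PySem.List.max?_eq_none_iff _ _).mp hmax
    obtain ⟨x, xs, hcons⟩ := List.exists_cons_of_ne_nil hflne
    have hxmem : x ∈ PySem.Set.ofList fl := (PySem.Set.mem_ofList _ _).mpr (hcons ▸ List.mem_cons_self)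
    have : (x, (fl.count x : Int)) ∈ chars.items := by
      rw [hitems]; exact List.mem_map.mpr ⟨x, hxmem, rfl⟩
    have : (fl.count x : Int) ∈ chars.values := by
      simp only [PySem.Dict.values]
      exact List.mem_map.mpr ⟨_, this, rfl⟩
    rw [hvals] at this
    exact absurd this (List.not_mem_nil)
  | some m =>
    -- bounds involving m
    have hub : ∀ p ∈ chars.items, p.2 ≤ m := by
      intro p hp
      have : p.2 ∈ chars.values := by
        simp only [PySem.Dict.values]; exact List.mem_map.mpr ⟨p, hp, rfl⟩
      exact PySem.List.max?_isMax hmax _ this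
    have hm1 : 1 ≤ m := by
      have hmm := PySem.List.max?_mem hmax
      simp only [PySem.Dict.values] at hmm
      obtain ⟨p, hp, hpm⟩ := List.mem_map.mp hmm
      have := hbounds p hp
      omega
    set cols := PySem.List.sorted2 chars.items (fun p => p.1) (fun p => p.2) with hcols
    have hcolsperm : cols.Perm chars.items := PySem.List.sorted2_perm _ _ _ _
    have hcolsne : cols ≠ [] := by
      intro h
      rw [h] at hcolsperm
      have := hcolsperm.symm.eq_nil
      rw [hitems] at this
      obtain ⟨x, xs, hcons⟩ := List.exists_cons_of_ne_nil hflne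
      have hxmem : x ∈ PySem.Set.ofList fl := (PySem.Set.mem_ofList _ _).mpr (hcons ▸ List.mem_cons_self)
      exact absurd (List.map_eq_nil_iff.mp this ▸ hxmem) (List.not_mem_nil)
    have hcb : ∀ p ∈ cols, 1 ≤ p.2 ∧ p.2 ≤ m := fun p hp =>
      ⟨hbounds p (hcolsperm.mem_iff.mp hp), hub p (hcolsperm.mem_iff.mp hp)⟩
    -- the bars
    set bar : Char × Int → List Char := fun p =>
      List.replicate (m - p.2).toNat ' ' ++ List.replicate p.2.toNat '#' with hbar
    have hbarsne : cols.map bar ≠ [] := by simpa using hcolsne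
    have hbarlen : ∀ l ∈ cols.map bar, l.length = m.toNat := by
      intro l hl
      obtain ⟨p, hp, rfl⟩ := List.mem_map.mp hl
      have := hcb p hp
      simp [hbar]
      omega
    -- rows of B = rows of A
    have hrows : (pvZip (cols.map bar)).map (fun r => PySem.Chars.join [] (r.map (fun c => [c])))
        = (PySem.List.pyRange m 0 (-1)).map
            (fun height => PySem.Chars.join []
              (cols.map (fun column => if height ≤ column.2 then ['#'] else [' ']))) := by
      rw [pvZip_uniform m.toNat (cols.map bar) hbarsne hbarlen]
      rw [PySem.List.pyRange_neg_one]
      have : (m - 0).toNat = m.toNat := by omega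
      rw [this]
      simp only [List.map_map]
      apply List.map_congr_left
      intro k hk
      have hk' : k < m.toNat := List.mem_range.mp hk
      simp only [Function.comp_apply]
      rw [PySem.Chars.join_nil_singletons]
      have h1 : cols.map (fun column => if m - (k : Int) ≤ column.2 then ['#'] else [' '])
          = (cols.map (fun column => if m - (k : Int) ≤ column.2 then '#' else ' ')).map (fun c => [c]) := by
        rw [List.map_map]
        apply List.map_congr_left
        intro p _
        exact (apply_ite (fun c => ([c] : List Char)) _ '#' ' ').symm
      rw [h1, PySem.Chars.join_nil_singletons]
      apply List.map_congr_left
      intro p hp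
      simp only [Function.comp_apply, hbar]
      exact pv_bar_getD m p.2 k (hcb p hp).1 (hcb p hp).2 hk'
    show String.ofList (PySem.Chars.join ['\n'] ((PySem.List.pyRange m 0 (-1)).map
          (fun height => PySem.Chars.join []
            (cols.map (fun column => if height ≤ column.2 then ['#'] else [' '])))) ++ ['\n']
        ++ PySem.Chars.join [] (cols.map (fun column => [column.1])))
      = String.ofList (PySem.Chars.join ['\n'] ((pvZip (cols.map bar)).map
          (fun r => PySem.Chars.join [] (r.map (fun c => [c])))) ++ ['\n']
        ++ PySem.Chars.join [] (cols.map (fun p => [p.1])))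
    rw [hrows]
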